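-- pv_equiv track=rewrite | github.com/romeorizzi/temi_prog_public | 2018.12.05.provetta/all-CMS-submissions-2018-12-05/2018-12-05.12:59:08.768591.VR429669.rank_unrank_ABstrings.py | ABstring_of_len_and_rank
-- ===== SOURCE A (Python) =====
-- def ABstring_of_len_and_rank(length, r):
--     parola=""
--     while(r!=0):
--         if(r%2==0):
--             parola="A"+parola
--         else:
--             parola="B"+parola
--         r=int(r/2)
--     if(len(parola)<length):
--         parola="A"*(length-len(parola))+parola
--     return parola
-- ===== SOURCE B (Python) =====
-- def ABstring_of_len_and_rank(length, r):
--     m = abs(r)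
--     w = max(length, m.bit_length())
--     return ''.join('B' if (m >> i) & 1 else 'A' for i in range(w - 1, -1, -1))
-- ===== Notes on version B (the rewrite author's own statement) =====
-- stated objective: alternative
-- what changed: B computes the output width once as max(length, bit_length(|r|)) and emits characters positionally MSB-first with shifts and a join, instead of A's repeated-halving loop that prepends to a string and then pads in a separate branch.
import Mathlib
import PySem

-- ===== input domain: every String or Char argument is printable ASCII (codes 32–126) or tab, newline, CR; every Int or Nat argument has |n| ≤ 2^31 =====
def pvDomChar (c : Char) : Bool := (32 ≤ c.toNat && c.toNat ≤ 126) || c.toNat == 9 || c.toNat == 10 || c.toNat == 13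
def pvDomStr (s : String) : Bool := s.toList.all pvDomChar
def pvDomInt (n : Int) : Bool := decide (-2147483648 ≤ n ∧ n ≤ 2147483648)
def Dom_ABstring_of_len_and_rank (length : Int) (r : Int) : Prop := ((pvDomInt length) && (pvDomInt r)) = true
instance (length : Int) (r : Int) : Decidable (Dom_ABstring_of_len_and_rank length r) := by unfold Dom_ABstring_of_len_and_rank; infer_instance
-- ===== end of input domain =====

-- B replaces A's halving loop (prepend a char per division, then a separate pad branch) by computing
-- the output width once and emitting the characters positionally MSB-first — an alternative decomposition.

-- ===== PORT A =====
-- A's while-loop: prepend 'A'/'B' according to r % 2, then r = int(r/2) (truncating division;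
-- PySem.Int.truncdiv is exact for |r| < 2^53, which Dom's |r| ≤ 2^31 guarantees).
def pvALoop (r : Int) (parola : List Char) : List Char :=
  if r = 0 then parola
  else pvALoop (PySem.Int.truncdiv r 2)
       ((if PySem.Int.mod r 2 = 0 then 'A' else 'B') :: parola)
termination_by r.natAbs
decreasing_by
  simp only [PySem.Int.truncdiv, Int.natAbs_tdiv]
  exact Nat.div_lt_self (by omega) (by omega)

def ABstring_of_len_and_rank (length : Int) (r : Int) : String :=
  let parola := pvALoop r []
  let parola := if (parola.length : Int) < length
      then PySem.List.pyRepeat ['A'] (length - (parola.length : Int)) ++ parola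
      else parola
  String.ofList parola

-- ===== PORT B =====
-- every i produced by range(w-1, -1, -1) is nonnegative, so i.toNat is exact
def ABstring_of_len_and_rank_alt (length : Int) (r : Int) : String :=
  let m : Int := |r|
  let w : Int := max length ((PySem.Int.bitLength m : Nat) : Int)
  String.ofList ((PySem.List.pyRange (w - 1) (-1) (-1)).map
    (fun i => if PySem.Int.band (m >>> i.toNat) 1 = 1 then 'B' else 'A'))

-- ===== PRECONDITION & SPEC =====
def Spec_ABstring_of_len_and_rank (length : Int) (r : Int) (out : String) : Prop := out = ABstring_of_len_and_rank_alt length r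
instance (length : Int) (r : Int) (out : String) : Decidable (Spec_ABstring_of_len_and_rank length r out) := by unfold Spec_ABstring_of_len_and_rank; infer_instance

-- ===== CLAIM (what is proved, stated in full; the proofs are below) =====
def Claim_equal_ABstring_of_len_and_rank : Prop := ∀ (length : Int) (r : Int), Dom_ABstring_of_len_and_rank length r → Spec_ABstring_of_len_and_rank length r (ABstring_of_len_and_rank length r)

-- ===== LEMMAS AND PROOFS =====

-- MSB-first binary digits of a natural number ('' for 0), the list A's loop builds
def pvBits : Nat → List Char
  | 0 => []
  | (n+1) => pvBits ((n+1)/2) ++ [if (n+1) % 2 = 1 then 'B' else 'A']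
decreasing_by omega

-- the character B emits at bit position v
def pvDig (m v : Nat) : Char := if (m >>> v) % 2 = 1 then 'B' else 'A'

-- B's output of width W, MSB first
def pvPad (m : Nat) : Nat → List Char
  | 0 => []
  | (v+1) => pvDig m v :: pvPad m v

lemma pvALoop_eq : ∀ (n : Nat) (r : Int), r.natAbs = n → ∀ acc, pvALoop r acc = pvBits r.natAbs ++ acc := by
  intro n
  induction n using Nat.strong_induction_on with
  | _ n ih =>
    intro r hn acc
    rw [pvALoop]
    by_cases h0 : r = 0
    · simp [h0, pvBits]
    · have hmod : PySem.Int.mod r 2 = ((r.natAbs % 2 : Nat) : Int) := by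
        rw [PySem.Int.mod_eq_emod_of_pos (by omega)]; omega
      have hdiv : (PySem.Int.truncdiv r 2).natAbs = r.natAbs / 2 := by
        simp only [PySem.Int.truncdiv, Int.natAbs_tdiv]; rfl
      have hpos : 0 < r.natAbs := by omega
      obtain ⟨k, hk⟩ : ∃ k, r.natAbs = k + 1 := ⟨r.natAbs - 1, by omega⟩
      have := ih (PySem.Int.truncdiv r 2).natAbs
        (by rw [hdiv]; omega) (PySem.Int.truncdiv r 2) rfl
        ((if PySem.Int.mod r 2 = 0 then 'A' else 'B') :: acc)
      simp only [h0, ite_false] at *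
      rw [this, hdiv, hk]
      rw [show pvBits (k+1) = pvBits ((k+1)/2) ++ [if (k+1) % 2 = 1 then 'B' else 'A'] from by rw [pvBits]]
      have hm2 : PySem.Int.mod r 2 = 0 ↔ (k+1) % 2 ≠ 1 := by
        rw [hmod, hk]; omega
      by_cases hp : (k+1) % 2 = 1
      · rw [if_neg (by rw [hm2]; simp [hp]), if_pos hp]; simp
      · rw [if_pos (hm2.mpr hp), if_neg hp]; simp

lemma pvBits_length : ∀ n : Nat, (pvBits n).length = PySem.Int.bitLength (n : Int) := by
  intro n
  induction n using Nat.strong_induction_on with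
  | _ n ih =>
    match n with
    | 0 => simp [pvBits, PySem.Int.bitLength_zero]
    | (k+1) =>
      rw [pvBits, PySem.Int.bitLength_natCast (by omega)]
      simp [ih ((k+1)/2) (by omega)]

lemma pvDig_succ (m v : Nat) : pvDig m (v+1) = pvDig (m/2) v := by
  simp only [pvDig, Nat.shiftRight_succ_inside]

lemma pvPad_succ_append (m : Nat) : ∀ v, pvPad m (v+1) = pvPad (m/2) v ++ [pvDig m 0] := by
  intro v
  induction v with
  | zero => simp [pvPad]
  | succ k ih =>
    rw [show pvPad m (k+1+1) = pvDig m (k+1) :: pvPad m (k+1) from rfl, ih,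
        pvDig_succ, show pvPad (m/2) (k+1) = pvDig (m/2) k :: pvPad (m/2) k from rfl]
    simp

lemma pvPad_eq : ∀ (W m : Nat), (pvBits m).length ≤ W →
    pvPad m W = List.replicate (W - (pvBits m).length) 'A' ++ pvBits m := by
  intro W
  induction W with
  | zero =>
    intro m h
    have : pvBits m = [] := List.eq_nil_of_length_eq_zero (by omega)
    simp [pvPad, this]
  | succ v ih =>
    intro m h
    rw [pvPad_succ_append]
    by_cases hm : m = 0
    · subst hm
      have h0 : pvBits 0 = [] := by rw [pvBits]
      have hd : pvDig 0 0 = 'A' := by decide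
      rw [ih 0 (by simp [h0]), h0, hd]
      simp [← List.replicate_succ' (n := v)]
    · obtain ⟨k, rfl⟩ : ∃ k, m = k + 1 := ⟨m - 1, by omega⟩
      have hb : pvBits (k+1) = pvBits ((k+1)/2) ++ [if (k+1) % 2 = 1 then 'B' else 'A'] := by
        rw [pvBits]
      have hlen : (pvBits (k+1)).length = (pvBits ((k+1)/2)).length + 1 := by
        rw [hb]; simp
      have hd : pvDig (k+1) 0 = (if (k+1) % 2 = 1 then 'B' else 'A') := by
        simp [pvDig, Nat.shiftRight_zero]
      rw [ih ((k+1)/2) (by omega), hd, hb]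
      have h2 : v + 1 - (pvBits ((k+1)/2) ++ [if (k+1) % 2 = 1 then 'B' else 'A']).length
          = v - (pvBits ((k+1)/2)).length := by
        simp only [List.length_append, List.length_singleton]; omega
      rw [h2, List.append_assoc]

lemma pvMap_range_eq_pvPad (m : Nat) : ∀ W : Nat,
    (List.range W).map (fun k => pvDig m (W - 1 - k)) = pvPad m W := by
  intro W
  induction W with
  | zero => simp [pvPad]
  | succ v ih =>
    rw [List.range_succ_eq_map, List.map_cons, List.map_map,
        show pvPad m (v+1) = pvDig m v :: pvPad m v from rfl, ← ih]
    congr 1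
    apply List.map_congr_left
    intro k _
    show pvDig m (v + 1 - 1 - (k + 1)) = pvDig m (v - 1 - k)
    congr 1; omega

-- ===== VERDICT (by name: the statement is the Claim_ definition above) =====
theorem ABstring_of_len_and_rank_spec : Claim_equal_ABstring_of_len_and_rank := by
  unfold Claim_equal_ABstring_of_len_and_rank Spec_ABstring_of_len_and_rank
  intro length r _
  simp only [ABstring_of_len_and_rank, ABstring_of_len_and_rank_alt]
  set m : Nat := r.natAbs with hm
  have habs : |r| = (m : Int) := Int.abs_eq_natAbs r
  set B : Nat := (pvBits m).length with hB
  have hbl : PySem.Int.bitLength (m : Int) = B := (pvBits_length m).symm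
  set W : Nat := (max length (B : Int)).toNat with hW
  have hw0 : max length ((PySem.Int.bitLength ((m : Nat) : Int) : Nat) : Int) = (W : Int) := by
    rw [hbl, hW]
    exact (Int.toNat_of_nonneg (le_max_of_le_right (Int.natCast_nonneg B))).symm
  have hWB : (W : Int) = max length (B : Int) :=
    Int.toNat_of_nonneg (le_max_of_le_right (Int.natCast_nonneg B))
  have hmax : (B : Int) ≤ W ∧ length ≤ (W : Int) ∧ ((W : Int) = length ∨ (W : Int) = (B : Int)) := by
    rcases max_cases length ((B : Int)) with ⟨h1, h2⟩ | ⟨h1, h2⟩ <;> rw [h1] at hWB <;>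
      refine ⟨by omega, by omega, by omega⟩
  -- B's character list is pvPad m W
  have hrange : PySem.List.pyRange ((W : Int) - 1) (-1) (-1)
      = (List.range W).map (fun k : Nat => (W : Int) - 1 - (k : Int)) := by
    rw [PySem.List.pyRange_neg_one]
    congr 1
    rw [show (W : Int) - 1 - -1 = (W : Int) from by ring, Int.toNat_natCast]
  have hmapB : (PySem.List.pyRange ((W : Int) - 1) (-1) (-1)).map
      (fun i => if PySem.Int.band ((m : Int) >>> i.toNat) 1 = 1 then 'B' else 'A')
      = pvPad m W := by
    rw [hrange, List.map_map, ← pvMap_range_eq_pvPad m W]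
    apply List.map_congr_left
    intro k hk
    have hkW : k < W := List.mem_range.mp hk
    have ht : ((W : Int) - 1 - (k : Int)).toNat = W - 1 - k := by omega
    have hband : ∀ x : Nat, PySem.Int.band ((x : Nat) : Int) 1 = ((x % 2 : Nat) : Int) := by
      intro x
      rw [PySem.Int.band_one, PySem.Int.mod_eq_emod_of_pos (by omega)]
      omega
    simp only [Function.comp, ht, Int.shiftRight_natCast, hband, pvDig]
    by_cases hp : (m >>> (W - 1 - k)) % 2 = 1
    · rw [if_pos (by exact_mod_cast hp), if_pos hp]
    · rw [if_neg (fun hq => hp (by exact_mod_cast hq)), if_neg hp]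
  have hA : pvALoop r [] = pvBits m := by
    rw [pvALoop_eq r.natAbs r rfl []]; simp [hm]
  have hpad := pvPad_eq W m (by omega)
  rw [hA, habs, hw0, hmapB, hpad, ← hB]
  congr 1
  by_cases hlt : ((B : Nat) : Int) < length
  · rw [if_pos hlt, PySem.List.pyRepeat_singleton]
    congr 2
    omega
  · rw [if_neg hlt]
    rw [show W - B = 0 from by omega]
    simp
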